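-- pv_equiv track=rewrite | github.com/JB55Matthews/PinnDE | src/pinnde/ODE/SolveClasses/ode_SystemDeepONetSolveClass.py | __reOrder_eqns
-- ===== SOURCE A (Python) =====
-- def __reOrder_eqns(eqns, inits, order):
--
--     return_eqns = []
--     return_inits = []
--     return_orders = []
--     while len(order) != 0:
--         max_order = order[0]
--         index = 0
--         for i in range(len(order)):
--             if order[i] > max_order:
--                 max_order = order[i]
--                 index = i
--         return_eqns.append(eqns.pop(index))
--         return_inits.append(inits.pop(index))
--         return_orders.append(order.pop(index))
--     return return_eqns, return_inits, return_orders
-- ===== SOURCE B (Python) =====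
-- # B: stable descending sort via one sorted() call on indices keyed by (-order[i], i),
-- # instead of A's repeated max-scan-and-pop selection loop. Return value only:
-- # A empties its argument lists in place, B leaves them untouched.
-- def __reOrder_eqns(eqns, inits, order):
--     idx = sorted(range(len(order)), key=lambda i: (-order[i], i))
--     return ([eqns[i] for i in idx],
--             [inits[i] for i in idx],
--             [order[i] for i in idx])
-- ===== Notes on version B (the rewrite author's own statement) =====
-- stated objective: faster
-- what changed: A's quadratic repeated max-scan with three parallel pops is replaced by one stable sorted() call on indices keyed by (-order[i], i), then three index-map passes; B also leaves the argument lists unmutated while A empties them in place (return values are equal).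
import Mathlib
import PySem

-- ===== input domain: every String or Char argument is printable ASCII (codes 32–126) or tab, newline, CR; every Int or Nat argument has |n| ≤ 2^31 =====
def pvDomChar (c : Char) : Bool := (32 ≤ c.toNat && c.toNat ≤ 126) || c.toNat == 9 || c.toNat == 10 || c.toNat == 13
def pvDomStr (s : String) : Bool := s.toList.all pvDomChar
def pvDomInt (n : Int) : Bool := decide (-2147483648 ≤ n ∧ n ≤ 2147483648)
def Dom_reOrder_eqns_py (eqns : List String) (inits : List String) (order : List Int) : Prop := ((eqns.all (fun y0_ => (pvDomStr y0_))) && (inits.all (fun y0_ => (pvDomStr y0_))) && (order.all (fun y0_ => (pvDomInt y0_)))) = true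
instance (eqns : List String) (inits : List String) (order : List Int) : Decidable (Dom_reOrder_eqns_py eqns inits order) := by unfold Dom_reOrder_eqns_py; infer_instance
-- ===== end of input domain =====

-- B replaces A's O(n^2) repeated max-scan-and-pop selection by one stable sort of the
-- indices keyed by (-order[i], i); equivalence is about the RETURN value only
-- (Python A empties its three argument lists in place, Python B does not mutate them).

-- ===== PORT A =====
-- A's inner `for i in range(len(order))` max scan: state (max_order, index),
-- starting from (order[0], 0).  order[i] is in range for every visited i, so
-- List.getD is exact here; order[0] is `headD` (A only runs it on nonempty order).
def argmaxPair (order : List Int) : Int × Nat :=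
  (List.range order.length).foldl
    (fun mi i => if order.getD i 0 > mi.1 then (order.getD i 0, i) else mi)
    (order.headD 0, 0)

-- A's `while len(order) != 0` loop with the three accumulator lists.
-- The three `.pop(index)` are PySem.List.pop?; `none` is Python's IndexError
-- (only reachable when eqns or inits is shorter than order, outside Pre_),
-- where the port stops with the accumulators as a junk value.
def reOrderAGo (re ri : List String) (ro : List Int) (eqns inits : List String) (order : List Int) : List String × List String × List Int :=
  if h : order.length = 0 then (re, ri, ro)
  else
    match he : PySem.List.pop? eqns ((argmaxPair order).2 : Int),
          hi : PySem.List.pop? inits ((argmaxPair order).2 : Int),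
          ho : PySem.List.pop? order ((argmaxPair order).2 : Int) with
    | some pe, some pi, some po =>
        reOrderAGo (re ++ [pe.1]) (ri ++ [pi.1]) (ro ++ [po.1]) pe.2 pi.2 po.2
    | _, _, _ => (re, ri, ro)
termination_by order.length
decreasing_by
  have := PySem.List.length_of_pop?_eq_some order ho; omega

def reOrder_eqns_py (eqns : List String) (inits : List String) (order : List Int) : List String × List String × List Int :=
  reOrderAGo [] [] [] eqns inits order

-- ===== PORT B =====
-- Source B: idx = sorted(range(len(order)), key=lambda i: (-order[i], i)); the tuple key is
-- Python's lexicographic order = Lex (Int × Int); every i in idx is < len(order), and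
-- Pre_ gives len(order) ≤ len(eqns), len(inits), so List.getD is exact for the lookups.
def reOrder_eqns_py_alt (eqns : List String) (inits : List String) (order : List Int) : List String × List String × List Int :=
  let idx := PySem.List.sorted (List.range order.length)
      (fun i => (toLex ((-(order.getD i 0) : Int), (i : Int)) : Lex (Int × Int))) false
  (idx.map (fun i => eqns.getD i ""),
   idx.map (fun i => inits.getD i ""),
   idx.map (fun i => order.getD i 0))

-- ===== PRECONDITION & SPEC =====
-- Pre_ excludes exactly the inputs where Python A raises IndexError: A pops eqns and
-- inits once per element of order, so it raises iff one of them is shorter than order.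
def Pre_reOrder_eqns_py (eqns : List String) (inits : List String) (order : List Int) : Prop :=
  order.length ≤ eqns.length ∧ order.length ≤ inits.length
instance (eqns : List String) (inits : List String) (order : List Int) : Decidable (Pre_reOrder_eqns_py eqns inits order) := by unfold Pre_reOrder_eqns_py; infer_instance

def pvWitness_reOrder_eqns_py : List String × List String × List Int :=
  (["u'' = u", "v'' = -v"], ["u(0)=1", "v(0)=2"], [1, 2])

def Spec_reOrder_eqns_py (eqns : List String) (inits : List String) (order : List Int) (out : List String × List String × List Int) : Prop := out = reOrder_eqns_py_alt eqns inits order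
instance (eqns : List String) (inits : List String) (order : List Int) (out : List String × List String × List Int) : Decidable (Spec_reOrder_eqns_py eqns inits order out) := by unfold Spec_reOrder_eqns_py; infer_instance

-- ===== CLAIM (what is proved, stated in full; the proofs are below) =====
def Claim_equal_reOrder_eqns_py : Prop := ∀ (eqns : List String) (inits : List String) (order : List Int), Dom_reOrder_eqns_py eqns inits order → Pre_reOrder_eqns_py eqns inits order → Spec_reOrder_eqns_py eqns inits order (reOrder_eqns_py eqns inits order)

-- ===== LEMMAS AND PROOFS =====

-- Partial runs of A's max scan (argmaxFold os os.length = argmaxPair os definitionally).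
def argmaxFold (os : List Int) (n : Nat) : Int × Nat :=
  (List.range n).foldl
    (fun mi i => if os.getD i 0 > mi.1 then (os.getD i 0, i) else mi)
    (os.headD 0, 0)

-- Characterisation of A's max scan: on a nonempty list it returns the value and the
-- FIRST index attaining the maximum.
theorem argmaxPair_spec (os : List Int) (h : os ≠ []) :
    (argmaxPair os).2 < os.length ∧
    os.getD (argmaxPair os).2 0 = (argmaxPair os).1 ∧
    (∀ p, p < os.length → os.getD p 0 ≤ (argmaxPair os).1) ∧
    (∀ p, p < (argmaxPair os).2 → os.getD p 0 < (argmaxPair os).1) := by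
  have key : ∀ n, n ≤ os.length →
      (argmaxFold os n).2 < max n 1 ∧
      os.getD (argmaxFold os n).2 0 = (argmaxFold os n).1 ∧
      (∀ p, p < n → os.getD p 0 ≤ (argmaxFold os n).1) ∧
      (∀ p, p < (argmaxFold os n).2 → os.getD p 0 < (argmaxFold os n).1) := by
    intro n
    induction n with
    | zero =>
      intro _
      refine ⟨by simp [argmaxFold], ?_, by omega, by simp [argmaxFold]⟩
      cases os with
      | nil => exact absurd rfl h
      | cons o t => simp [argmaxFold]
    | succ n ih =>
      intro hn
      obtain ⟨h1, h2, h3, h4⟩ := ih (by omega)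
      have hstep : argmaxFold os (n + 1) =
          (if os.getD n 0 > (argmaxFold os n).1 then (os.getD n 0, n) else argmaxFold os n) := by
        simp [argmaxFold, List.range_succ]
      by_cases hc : os.getD n 0 > (argmaxFold os n).1
      · rw [hstep, if_pos hc]
        exact ⟨by omega, rfl,
          fun p hp => by
            rcases Nat.lt_succ_iff_lt_or_eq.mp hp with hp' | hp'
            · exact le_of_lt (lt_of_le_of_lt (h3 p hp') hc)
            · simp [hp'],
          fun p hp => lt_of_le_of_lt (h3 p (by omega)) hc⟩
      · rw [hstep, if_neg hc]
        exact ⟨by omega, h2,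
          fun p hp => by
            rcases Nat.lt_succ_iff_lt_or_eq.mp hp with hp' | hp'
            · exact h3 p hp'
            · subst hp'; omega,
          h4⟩
  have hlen : 1 ≤ os.length := by
    cases os with
    | nil => exact absurd rfl h
    | cons o t => simp
  have := key os.length le_rfl
  have hax : argmaxPair os = argmaxFold os os.length := rfl
  rw [hax]
  exact ⟨by omega, this.2.1, this.2.2.1, this.2.2.2⟩

-- The lemma A's termination proof cites is PySem.List.length_of_pop?_eq_some (library).

-- Proof-side model: selection sort on index-tagged rows (tag, eqn, init, order).
def selN (l : List (Nat × String × String × Int)) : List (Nat × String × String × Int) :=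
  if h : l.length = 0 then []
  else
    l.getD (argmaxPair (l.map (fun p => p.2.2.2))).2 (0, "", "", 0) ::
      selN (l.eraseIdx (argmaxPair (l.map (fun p => p.2.2.2))).2)
termination_by l.length
decreasing_by
  have hb := (argmaxPair_spec (l.map (fun p => p.2.2.2))
      (by simpa [List.map_eq_nil_iff] using fun hl => h (by simp [hl]))).1
  simp only [List.length_map] at hb
  simp only [List.length_eraseIdx, List.map_subtype, List.unattach_attach]
  rw [if_pos hb]
  omega

def keyP (p : Nat × String × String × Int) : Lex (Int × Int) := toLex (-(p.2.2.2), (p.1 : Int))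

-- j is in range whenever l is nonempty (restatement of argmaxPair_spec for rows).
theorem argmax_lt_length (l : List (Nat × String × String × Int)) (h : l ≠ []) :
    (argmaxPair (l.map (fun p => p.2.2.2))).2 < l.length := by
  have := (argmaxPair_spec (l.map (fun p => p.2.2.2)) (by simpa [List.map_eq_nil_iff] using h)).1
  simpa using this

theorem selN_perm (l : List (Nat × String × String × Int)) : (selN l).Perm l := by
  have key : ∀ n (l : List (Nat × String × String × Int)), l.length = n → (selN l).Perm l := by
    intro n
    induction n using Nat.strong_induction_on with
    | _ n ih =>
      intro l hl
      rw [selN]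
      split_ifs with h0
      · have : l = [] := List.length_eq_zero_iff.mp h0
        simp [this]
      · have hne : l ≠ [] := by intro hc; exact h0 (by simp [hc])
        have hj := argmax_lt_length l hne
        rw [List.getD_eq_getElem _ _ hj]
        have hlen : (l.eraseIdx (argmaxPair (l.map (fun p => p.2.2.2))).2).length < n := by
          rw [List.length_eraseIdx, if_pos hj]; omega
        exact ((ih _ (by omega) _ rfl).cons _).trans
          (List.getElem_cons_eraseIdx_perm hj)
  exact key l.length l rfl

theorem selN_pairwise (l : List (Nat × String × String × Int))
    (ht : l.Pairwise (fun a b => a.1 < b.1)) :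
    (selN l).Pairwise (fun a b => keyP a < keyP b) := by
  have key : ∀ n (l : List (Nat × String × String × Int)), l.length = n →
      l.Pairwise (fun a b => a.1 < b.1) → (selN l).Pairwise (fun a b => keyP a < keyP b) := by
    intro n
    induction n using Nat.strong_induction_on with
    | _ n ih =>
      intro l hl ht
      rw [selN]
      split_ifs with h0
      · exact List.Pairwise.nil
      · have hne : l ≠ [] := by intro hc; exact h0 (by simp [hc])
        obtain ⟨hj, hv, hmax, hfirst⟩ :=
          argmaxPair_spec (l.map (fun p => p.2.2.2)) (by simpa [List.map_eq_nil_iff] using hne)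
        simp only [List.length_map] at hj
        rw [List.getD_eq_getElem _ _ hj]
        have hlen : (l.eraseIdx (argmaxPair (l.map (fun p => p.2.2.2))).2).length < n := by
          rw [List.length_eraseIdx, if_pos hj]; omega
        have ht' : (l.eraseIdx (argmaxPair (l.map (fun p => p.2.2.2))).2).Pairwise
            (fun a b => a.1 < b.1) := ht.sublist (List.eraseIdx_sublist l _)
        refine List.pairwise_cons.mpr ⟨?_, ih _ (by omega) _ rfl ht'⟩
        intro y hy
        have hy' : y ∈ l.eraseIdx (argmaxPair (l.map (fun p => p.2.2.2))).2 :=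
          (selN_perm _).mem_iff.mp hy
        obtain ⟨p, hp, hpj, hpy⟩ := List.mem_eraseIdx_iff_getElem.mp hy'
        -- values at j and p, through the projection list
        have hvj : (l.map (fun p => p.2.2.2)).getD (argmaxPair (l.map (fun p => p.2.2.2))).2 0
            = l[(argmaxPair (l.map (fun p => p.2.2.2))).2].2.2.2 := by
          rw [List.getD_eq_getElem _ _ (by simpa using hj)]; simp
        have hvp : (l.map (fun p => p.2.2.2)).getD p 0 = l[p].2.2.2 := by
          rw [List.getD_eq_getElem _ _ (by simpa using hp)]; simp
        have hle : l[p].2.2.2 ≤ l[(argmaxPair (l.map (fun p => p.2.2.2))).2].2.2.2 := by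
          have := hmax p (by simpa using hp)
          rw [hvp] at this; rw [hvj] at hv; omega
        subst hpy
        unfold keyP
        rw [Prod.Lex.toLex_lt_toLex]
        rcases lt_or_eq_of_le hle with hlt | heq
        · exact Or.inl (by omega)
        · refine Or.inr ⟨by omega, ?_⟩
          -- equal values: p cannot be before j (j is the FIRST max), so j < p and tags grow
          have hjp : (argmaxPair (l.map (fun p => p.2.2.2))).2 < p := by
            rcases Nat.lt_or_ge p (argmaxPair (l.map (fun p => p.2.2.2))).2 with hc | hc
            · have := hfirst p hc
              rw [hvp] at this; rw [hvj] at hv; omega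
            · omega
          have := (List.pairwise_iff_getElem.mp ht) _ _ hj hp hjp
          simp only []
          exact_mod_cast this
  exact key l.length l rfl ht

-- A's loop computes exactly selN, with whatever trailing junk eqns/inits carry past
-- the length of order.
theorem reOrderAGo_eq_selN (l : List (Nat × String × String × Int))
    (extraE extraI : List String) (re ri : List String) (ro : List Int) :
    reOrderAGo re ri ro (l.map (fun p => p.2.1) ++ extraE)
        (l.map (fun p => p.2.2.1) ++ extraI) (l.map (fun p => p.2.2.2)) =
      (re ++ (selN l).map (fun p => p.2.1),
       ri ++ (selN l).map (fun p => p.2.2.1),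
       ro ++ (selN l).map (fun p => p.2.2.2)) := by
  have key : ∀ n (l : List (Nat × String × String × Int)), l.length = n →
      ∀ (extraE extraI re ri : List String) (ro : List Int),
      reOrderAGo re ri ro (l.map (fun p => p.2.1) ++ extraE)
          (l.map (fun p => p.2.2.1) ++ extraI) (l.map (fun p => p.2.2.2)) =
        (re ++ (selN l).map (fun p => p.2.1),
         ri ++ (selN l).map (fun p => p.2.2.1),
         ro ++ (selN l).map (fun p => p.2.2.2)) := by
    intro n
    induction n using Nat.strong_induction_on with
    | _ n ih =>
      intro l hl extraE extraI re ri ro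
      rw [reOrderAGo]
      split_ifs with h0
      · have hnil : l = [] := by simpa using h0
        subst hnil
        rw [selN]
        simp
      · have hne : l ≠ [] := by intro hc; exact h0 (by simp [hc])
        have hj := argmax_lt_length l hne
        have hpe : PySem.List.pop? (l.map (fun p => p.2.1) ++ extraE)
            ((argmaxPair (l.map (fun p => p.2.2.2))).2 : Int)
            = some (l[(argmaxPair (l.map (fun p => p.2.2.2))).2]'hj |>.2.1,
                (l.eraseIdx (argmaxPair (l.map (fun p => p.2.2.2))).2).map (fun p => p.2.1) ++ extraE) := by
          rw [PySem.List.pop?_natCast _ _ (by simp [List.length_append]; omega)]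
          rw [List.getElem_append_left (by simpa using hj)]
          rw [List.eraseIdx_append_of_lt_length (by simpa using hj), List.eraseIdx_map]
          simp
        have hpi : PySem.List.pop? (l.map (fun p => p.2.2.1) ++ extraI)
            ((argmaxPair (l.map (fun p => p.2.2.2))).2 : Int)
            = some (l[(argmaxPair (l.map (fun p => p.2.2.2))).2]'hj |>.2.2.1,
                (l.eraseIdx (argmaxPair (l.map (fun p => p.2.2.2))).2).map (fun p => p.2.2.1) ++ extraI) := by
          rw [PySem.List.pop?_natCast _ _ (by simp [List.length_append]; omega)]
          rw [List.getElem_append_left (by simpa using hj)]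
          rw [List.eraseIdx_append_of_lt_length (by simpa using hj), List.eraseIdx_map]
          simp
        have hpo : PySem.List.pop? (l.map (fun p => p.2.2.2))
            ((argmaxPair (l.map (fun p => p.2.2.2))).2 : Int)
            = some (l[(argmaxPair (l.map (fun p => p.2.2.2))).2]'hj |>.2.2.2,
                (l.eraseIdx (argmaxPair (l.map (fun p => p.2.2.2))).2).map (fun p => p.2.2.2)) := by
          rw [PySem.List.pop?_natCast _ _ (by simpa using hj)]
          rw [List.eraseIdx_map]
          simp
        rw [hpe, hpi, hpo]
        dsimp only
        have hlen : (l.eraseIdx (argmaxPair (l.map (fun p => p.2.2.2))).2).length < n := by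
          rw [List.length_eraseIdx, if_pos hj]; omega
        have hrec := ih _ (by omega) (l.eraseIdx (argmaxPair (l.map (fun p => p.2.2.2))).2) rfl
          extraE extraI
          (re ++ [l[(argmaxPair (l.map (fun p => p.2.2.2))).2]'hj |>.2.1])
          (ri ++ [l[(argmaxPair (l.map (fun p => p.2.2.2))).2]'hj |>.2.2.1])
          (ro ++ [l[(argmaxPair (l.map (fun p => p.2.2.2))).2]'hj |>.2.2.2])
        have hsel : selN l = l[(argmaxPair (l.map (fun p => p.2.2.2))).2]'hj ::
            selN (l.eraseIdx (argmaxPair (l.map (fun p => p.2.2.2))).2) := by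
          rw [selN, dif_neg (show ¬ l.length = 0 by simpa using h0),
            List.getD_eq_getElem _ _ hj]
        rw [hrec, hsel]
        simp
  exact key l.length l rfl extraE extraI re ri ro

theorem map_getD_range {α : Type} (xs : List α) (d : α) (n : Nat) (h : n ≤ xs.length) :
    (List.range n).map (fun i => xs.getD i d) = xs.take n := by
  apply List.ext_getElem
  · simp [Nat.min_eq_left h]
  · intro i h1 h2
    have hi : i < n := by simpa using h1
    simp [List.getD, List.getElem?_eq_getElem (lt_of_lt_of_le hi h)]

-- ===== VERDICT (by name: the statement is the Claim_ definition above) =====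
-- Rows of the enumerated table carry exactly the getD values at their tag.
theorem mem_rowTable (eqns inits : List String) (order : List Int) (p : Nat × String × String × Int)
    (hp : p ∈ (List.range order.length).map
      (fun i => (i, eqns.getD i "", inits.getD i "", order.getD i 0))) :
    p.2.1 = eqns.getD p.1 "" ∧ p.2.2.1 = inits.getD p.1 "" ∧ p.2.2.2 = order.getD p.1 0 := by
  obtain ⟨i, _, rfl⟩ := List.mem_map.mp hp
  exact ⟨rfl, rfl, rfl⟩

theorem reOrder_eqns_py_spec : Claim_equal_reOrder_eqns_py := by
  intro eqns inits order hdom hpre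
  obtain ⟨hE, hI⟩ := hpre
  unfold Spec_reOrder_eqns_py
  -- the enumerated table of rows (tag, eqn, init, order)
  set l := (List.range order.length).map
      (fun i => (i, eqns.getD i "", inits.getD i "", order.getD i 0)) with hldef
  have hE1 : l.map (fun p => p.2.1) = eqns.take order.length := by
    rw [hldef, List.map_map]
    exact map_getD_range eqns "" order.length hE
  have hI1 : l.map (fun p => p.2.2.1) = inits.take order.length := by
    rw [hldef, List.map_map]
    exact map_getD_range inits "" order.length hI
  have hO1 : l.map (fun p => p.2.2.2) = order := by
    rw [hldef, List.map_map]
    have := map_getD_range order 0 order.length le_rfl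
    simpa using this
  have htag : l.map (fun p => p.1) = List.range order.length := by
    rw [hldef, List.map_map]
    simp [Function.comp_def]
  -- A's loop = selection sort on the table
  have hA : reOrder_eqns_py eqns inits order =
      ((selN l).map (fun p => p.2.1), (selN l).map (fun p => p.2.2.1),
       (selN l).map (fun p => p.2.2.2)) := by
    have h := reOrderAGo_eq_selN l (eqns.drop order.length) (inits.drop order.length) [] [] []
    rw [hE1, hI1, hO1, List.take_append_drop, List.take_append_drop] at h
    unfold reOrder_eqns_py
    simpa using h
  -- B's sorted index list = the tags of the selection sort
  have htp : l.Pairwise (fun a b => a.1 < b.1) := by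
    have h1 : (l.map (fun p => p.1)).Pairwise (fun a b => a < b) := by
      rw [htag]; exact List.pairwise_lt_range
    exact (List.pairwise_map.mp h1)
  have hidx : PySem.List.sorted (List.range order.length)
      (fun i => (toLex ((-(order.getD i 0) : Int), (i : Int)) : Lex (Int × Int))) false
      = (selN l).map (fun p => p.1) := by
    apply PySem.List.sorted_eq_of_perm_of_pairwise_lt
    · rw [← htag]
      exact (selN_perm l).map (fun p => p.1)
    · rw [List.pairwise_map]
      refine (selN_pairwise l htp).imp_of_mem ?_
      intro a b ha hb hab
      have ha' := mem_rowTable eqns inits order a ((selN_perm l).subset ha)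
      have hb' := mem_rowTable eqns inits order b ((selN_perm l).subset hb)
      unfold keyP at hab
      rw [ha'.2.2, hb'.2.2] at hab
      exact hab
  rw [hA]
  simp only [reOrder_eqns_py_alt]
  rw [hidx, List.map_map, List.map_map, List.map_map]
  refine congrArg₂ Prod.mk ?_ (congrArg₂ Prod.mk ?_ ?_) <;>
  · apply List.map_congr_left
    intro p hp
    have h := mem_rowTable eqns inits order p ((selN_perm l).subset hp)
    simp [Function.comp, h.1, h.2.1, h.2.2]
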